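-- pv_equiv track=rewrite | github.com/12vectors/carta | tools/carta_checks.py | split_body_into_sections
-- ===== SOURCE A (Python) =====
-- from typing import Optional
--
-- def split_body_into_sections(body: str) -> dict[str, str]:
--     """Split a node body into a dict of {heading: content} for H2 sections.
--
--     Heading keys are kept in their original form (e.g. "## When to use").
--     """
--     sections: dict[str, str] = {}
--     current_heading: Optional[str] = None
--     current_lines: list[str] = []
--
--     for line in body.splitlines():
--         stripped = line.strip()
--         if stripped.startswith("## ") and not stripped.startswith("### "):
--             # Flush previous section
--             if current_heading is not None:
--                 sections[current_heading] = "\n".join(current_lines).strip()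
--             current_heading = stripped
--             current_lines = []
--         else:
--             if current_heading is not None:
--                 current_lines.append(line)
--
--     if current_heading is not None:
--         sections[current_heading] = "\n".join(current_lines).strip()
--     return sections
-- ===== SOURCE B (Python) =====
-- def split_body_into_sections(body: str) -> dict[str, str]:
--     """Split a node body into a dict of {heading: content} for H2 sections."""
--     def is_h2(line: str) -> bool:
--         s = line.strip()
--         return s.startswith("## ") and not s.startswith("### ")
--
--     sections: dict[str, str] = {}
--     rest = body.splitlines()
--     # drop anything before the first H2 heading
--     while rest and not is_h2(rest[0]):
--         rest = rest[1:]
--     # rest now starts with a heading (or is empty): take heading, span its content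
--     while rest:
--         heading, rest = rest[0].strip(), rest[1:]
--         content = []
--         while rest and not is_h2(rest[0]):
--             content.append(rest[0])
--             rest = rest[1:]
--         sections[heading] = "\n".join(content).strip()
--     return sections
-- ===== Notes on version B (the rewrite author's own statement) =====
-- stated objective: alternative
-- what changed: Replaces A's single-pass flush-on-heading accumulator (pending heading + growing line buffer) with a recursive span decomposition: drop lines before the first H2 heading, then repeatedly take a heading and the span of lines up to the next heading as one section.
import Mathlib
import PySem

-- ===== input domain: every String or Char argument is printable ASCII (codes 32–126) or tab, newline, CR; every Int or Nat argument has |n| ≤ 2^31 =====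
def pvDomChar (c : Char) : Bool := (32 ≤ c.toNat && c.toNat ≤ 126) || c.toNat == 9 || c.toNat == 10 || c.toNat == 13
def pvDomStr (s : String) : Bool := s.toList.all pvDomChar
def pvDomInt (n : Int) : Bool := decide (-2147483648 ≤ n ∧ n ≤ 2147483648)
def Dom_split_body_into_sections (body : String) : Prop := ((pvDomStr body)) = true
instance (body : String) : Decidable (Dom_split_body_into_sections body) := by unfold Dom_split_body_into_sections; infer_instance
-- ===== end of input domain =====

-- B replaces A's flush-on-heading accumulator loop by a recursive span decomposition
-- (drop the preamble, then repeatedly take a heading and the span of lines up to the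
-- next heading); same cost, objective: alternative decomposition.

-- ===== PORT A =====
def pvAStep (st : PySem.Dict String String × Option String × List String) (line : String) :
    PySem.Dict String String × Option String × List String :=
  let stripped := PySem.Str.strip line
  if PySem.Str.startswith stripped "## " && !(PySem.Str.startswith stripped "### ") then
    match st.2.1 with
    | some h => (st.1.insert h (PySem.Str.strip (PySem.Str.join "\n" st.2.2)), some stripped, [])
    | none => (st.1, some stripped, [])
  else
    match st.2.1 with
    | some _ => (st.1, st.2.1, st.2.2 ++ [line])
    | none => st

def split_body_into_sections (body : String) : List (String × String) :=
  let st := (PySem.Str.splitlines body).foldl pvAStep (PySem.Dict.empty, none, [])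
  (match st.2.1 with
   | some h => st.1.insert h (PySem.Str.strip (PySem.Str.join "\n" st.2.2))
   | none => st.1).items

-- ===== PORT B =====
def pvIsH2 (line : String) : Bool :=
  let s := PySem.Str.strip line
  PySem.Str.startswith s "## " && !(PySem.Str.startswith s "### ")

def pvBLoop : List String → PySem.Dict String String → PySem.Dict String String
  | [], sections => sections
  | l :: ls, sections =>
    let content := ls.takeWhile (fun x => !pvIsH2 x)
    let rest := ls.dropWhile (fun x => !pvIsH2 x)
    pvBLoop rest
      (sections.insert (PySem.Str.strip l) (PySem.Str.strip (PySem.Str.join "\n" content)))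
  termination_by ls _ => ls.length
  decreasing_by
    exact Nat.lt_succ_of_le (List.length_dropWhile_le _ _)

def split_body_into_sections_alt (body : String) : List (String × String) :=
  (pvBLoop ((PySem.Str.splitlines body).dropWhile (fun x => !pvIsH2 x)) PySem.Dict.empty).items

-- ===== PRECONDITION & SPEC =====
def Spec_split_body_into_sections (body : String) (out : List (String × String)) : Prop := out = split_body_into_sections_alt body
instance (body : String) (out : List (String × String)) : Decidable (Spec_split_body_into_sections body out) := by unfold Spec_split_body_into_sections; infer_instance

-- ===== CLAIM (what is proved, stated in full; the proofs are below) =====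
def Claim_equal_split_body_into_sections : Prop := ∀ (body : String), Dom_split_body_into_sections body → Spec_split_body_into_sections body (split_body_into_sections body)

-- ===== LEMMAS AND PROOFS =====

def pvFinishA (st : PySem.Dict String String × Option String × List String) :
    PySem.Dict String String :=
  match st.2.1 with
  | some h => st.1.insert h (PySem.Str.strip (PySem.Str.join "\n" st.2.2))
  | none => st.1

lemma pvLemma_some (lines : List String) :
    ∀ (sec : PySem.Dict String String) (h : String) (cur : List String),
    pvFinishA (lines.foldl pvAStep (sec, some h, cur)) =
      pvBLoop (lines.dropWhile (fun x => !pvIsH2 x))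
        (sec.insert h (PySem.Str.strip
          (PySem.Str.join "\n" (cur ++ lines.takeWhile (fun x => !pvIsH2 x))))) := by
  induction lines with
  | nil => intro sec h cur; simp [pvFinishA, pvBLoop]
  | cons l ls ih =>
    intro sec h cur
    by_cases hl : pvIsH2 l = true
    · have hstep : pvAStep (sec, some h, cur) l =
        (sec.insert h (PySem.Str.strip (PySem.Str.join "\n" cur)), some (PySem.Str.strip l), []) := by
        simp only [pvAStep]
        rw [if_pos (by simpa [pvIsH2] using hl)]
      rw [List.foldl_cons, hstep, ih]
      rw [List.takeWhile_cons, List.dropWhile_cons]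
      simp only [hl, Bool.not_true, Bool.false_eq_true, if_false]
      rw [pvBLoop]
      simp
    · have hl' : (!pvIsH2 l) = true := by simp [hl]
      have hstep : pvAStep (sec, some h, cur) l = (sec, some h, cur ++ [l]) := by
        simp only [pvAStep]
        rw [if_neg (by simpa [pvIsH2] using hl)]
      rw [List.foldl_cons, hstep, ih]
      rw [List.takeWhile_cons, List.dropWhile_cons]
      simp [hl', List.append_assoc]

lemma pvLemma_none (lines : List String) :
    ∀ (sec : PySem.Dict String String),
    pvFinishA (lines.foldl pvAStep (sec, none, [])) =
      pvBLoop (lines.dropWhile (fun x => !pvIsH2 x)) sec := by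
  induction lines with
  | nil => intro sec; simp [pvFinishA, pvBLoop]
  | cons l ls ih =>
    intro sec
    by_cases hl : pvIsH2 l = true
    · have hstep : pvAStep (sec, none, []) l = (sec, some (PySem.Str.strip l), []) := by
        simp only [pvAStep]
        rw [if_pos (by simpa [pvIsH2] using hl)]
      rw [List.foldl_cons, hstep, pvLemma_some ls]
      rw [List.dropWhile_cons]
      simp only [hl, Bool.not_true, Bool.false_eq_true, reduceIte]
      rw [pvBLoop]
      simp
    · have hstep : pvAStep (sec, none, []) l = (sec, none, []) := by
        simp only [pvAStep]
        rw [if_neg (by simpa [pvIsH2] using hl)]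
      rw [List.foldl_cons, hstep, ih]
      rw [List.dropWhile_cons]
      simp [hl]

-- ===== VERDICT (by name: the statement is the Claim_ definition above) =====
theorem split_body_into_sections_spec : Claim_equal_split_body_into_sections := by
  intro body _
  show split_body_into_sections body = split_body_into_sections_alt body
  simp only [split_body_into_sections, split_body_into_sections_alt]
  rw [← pvLemma_none]
  generalize (PySem.Str.splitlines body).foldl pvAStep (PySem.Dict.empty, none, []) = st
  rcases st with ⟨s, h, c⟩
  cases h <;> rfl
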